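-- pv_equiv track=rewrite | github.com/Moomooti/coding_test | 0911.py | max_preference_in_time_range
-- ===== SOURCE A (Python) =====
-- def max_preference_in_time_range(celeb_times, ystart, yend):
--     max_pref = 0
--     time_of_max = ystart
--     for t in range(ystart, yend):
--         total_pref = 0
--         for start, end, pref in celeb_times:
--             if start <= t < end:
--                 total_pref += pref # pref는 각 연예인의 선호도 값
--         if total_pref > max_pref:
--             max_pref = total_pref
--             time_of_max = t
--     return time_of_max, max_pref
-- ===== SOURCE B (Python) =====
-- def max_preference_in_time_range(celeb_times, ystart, yend):
--     # Difference-array sweep: apply each interval once to a delta dict,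
--     # then one accumulating pass over the time range (O(R + n) vs A's O(R * n)).
--     delta = {}
--     for start, end, pref in celeb_times:
--         s = max(start, ystart)
--         e = min(end, yend)
--         if s < e:
--             delta[s] = delta.get(s, 0) + pref
--             delta[e] = delta.get(e, 0) - pref
--     max_pref = 0
--     time_of_max = ystart
--     running = 0
--     for t in range(ystart, yend):
--         running += delta.get(t, 0)
--         if running > max_pref:
--             max_pref = running
--             time_of_max = t
--     return time_of_max, max_pref
-- ===== Notes on version B (the rewrite author's own statement) =====
-- stated objective: alternative
-- what changed: B replaces A's inner scan of all intervals at every time point by a difference-array dict built once from the clamped interval endpoints, then a single accumulating sweep over the time range (O(R+n) work instead of O(R*n); a timing run's per-input ratios were inconsistent, so no speed is claimed).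
import Mathlib
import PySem

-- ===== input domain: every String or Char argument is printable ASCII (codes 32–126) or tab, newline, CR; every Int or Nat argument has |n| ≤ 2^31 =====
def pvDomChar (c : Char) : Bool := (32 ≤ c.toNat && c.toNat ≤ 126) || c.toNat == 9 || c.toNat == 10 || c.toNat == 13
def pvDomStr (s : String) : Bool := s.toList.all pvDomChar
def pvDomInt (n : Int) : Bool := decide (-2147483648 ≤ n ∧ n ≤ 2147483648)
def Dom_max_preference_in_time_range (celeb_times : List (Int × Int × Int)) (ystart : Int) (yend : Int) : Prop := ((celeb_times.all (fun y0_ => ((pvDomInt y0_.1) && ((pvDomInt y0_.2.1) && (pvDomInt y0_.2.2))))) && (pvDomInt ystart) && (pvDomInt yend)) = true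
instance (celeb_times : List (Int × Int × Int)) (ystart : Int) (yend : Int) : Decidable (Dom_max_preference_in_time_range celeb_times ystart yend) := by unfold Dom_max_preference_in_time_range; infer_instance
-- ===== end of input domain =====

-- B replaces A's per-time rescan of all intervals by a difference-array dict built once,
-- plus one accumulating pass over the time range (objective: alternative algorithm).


-- ===== PORT A =====
-- inner loop: total_pref = sum of pref over intervals covering t
def covSum (celeb_times : List (Int × Int × Int)) (t : Int) : Int :=
  celeb_times.foldl
    (fun total_pref x => if x.1 ≤ t ∧ t < x.2.1 then total_pref + x.2.2 else total_pref) 0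

-- body of A's outer loop; state = (max_pref, time_of_max)
def stepA (celeb_times : List (Int × Int × Int)) (st : Int × Int) (t : Int) : Int × Int :=
  let total_pref := covSum celeb_times t
  if total_pref > st.1 then (total_pref, t) else st

def max_preference_in_time_range (celeb_times : List (Int × Int × Int)) (ystart : Int) (yend : Int) : Int × Int :=
  let st := (PySem.List.pyRange ystart yend 1).foldl (stepA celeb_times) (0, ystart)
  (st.2, st.1)

-- ===== PORT B =====
-- delta[s] = delta.get(s,0)+pref ; delta[e] = delta.get(e,0)-pref  (clamped to [ystart, yend))
def buildDelta (celeb_times : List (Int × Int × Int)) (ystart : Int) (yend : Int) : PySem.Dict Int Int :=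
  celeb_times.foldl
    (fun d x =>
      let s := max x.1 ystart
      let e := min x.2.1 yend
      if s < e then (d.modify s 0 (· + x.2.2)).modify e 0 (· - x.2.2) else d)
    PySem.Dict.empty

-- body of B's sweep loop; state = (max_pref, time_of_max, running)
def stepB (delta : PySem.Dict Int Int) (st : Int × Int × Int) (t : Int) : Int × Int × Int :=
  let running := st.2.2 + delta.getD t 0
  if running > st.1 then (running, t, running) else (st.1, st.2.1, running)

def max_preference_in_time_range_alt (celeb_times : List (Int × Int × Int)) (ystart : Int) (yend : Int) : Int × Int :=
  let delta := buildDelta celeb_times ystart yend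
  let st := (PySem.List.pyRange ystart yend 1).foldl (stepB delta) (0, ystart, 0)
  (st.2.1, st.1)

-- ===== PRECONDITION & SPEC =====
def Spec_max_preference_in_time_range (celeb_times : List (Int × Int × Int)) (ystart : Int) (yend : Int) (out : Int × Int) : Prop := out = max_preference_in_time_range_alt celeb_times ystart yend
instance (celeb_times : List (Int × Int × Int)) (ystart : Int) (yend : Int) (out : Int × Int) : Decidable (Spec_max_preference_in_time_range celeb_times ystart yend out) := by unfold Spec_max_preference_in_time_range; infer_instance

-- ===== CLAIM (what is proved, stated in full; the proofs are below) =====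
def Claim_equal_max_preference_in_time_range : Prop := ∀ (celeb_times : List (Int × Int × Int)) (ystart : Int) (yend : Int), Dom_max_preference_in_time_range celeb_times ystart yend → Spec_max_preference_in_time_range celeb_times ystart yend (max_preference_in_time_range celeb_times ystart yend)

-- ===== LEMMAS AND PROOFS =====

-- contribution of one interval to delta at key t
def contrib (ystart yend : Int) (x : Int × Int × Int) (t : Int) : Int :=
  if max x.1 ystart < min x.2.1 yend then
    (if max x.1 ystart = t then x.2.2 else 0) + (if min x.2.1 yend = t then -x.2.2 else 0)
  else 0

def contribSum (celeb_times : List (Int × Int × Int)) (ystart yend t : Int) : Int :=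
  (celeb_times.map (fun x => contrib ystart yend x t)).sum

lemma getD_buildDelta_aux (celeb : List (Int × Int × Int)) (ystart yend t : Int)
    (d : PySem.Dict Int Int) :
    (celeb.foldl
      (fun d x =>
        let s := max x.1 ystart
        let e := min x.2.1 yend
        if s < e then (d.modify s 0 (· + x.2.2)).modify e 0 (· - x.2.2) else d)
      d).getD t 0 = d.getD t 0 + contribSum celeb ystart yend t := by
  induction celeb generalizing d with
  | nil => simp [contribSum]
  | cons x xs ih =>
    simp only [List.foldl_cons, ih, contribSum, List.map_cons, List.sum_cons]
    by_cases hse : max x.1 ystart < min x.2.1 yend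
    · have hne : min x.2.1 yend ≠ max x.1 ystart := by omega
      rw [if_pos hse]
      by_cases hte : t = min x.2.1 yend
      · subst hte
        rw [PySem.Dict.getD_modify_self, PySem.Dict.getD_modify_of_ne _ _ _ hne]
        have hc : contrib ystart yend x (min x.2.1 yend) = -x.2.2 := by
          unfold contrib; rw [if_pos hse, if_neg (Ne.symm hne), if_pos rfl]; ring
        rw [hc]; ring
      · rw [PySem.Dict.getD_modify_of_ne _ _ _ hte]
        by_cases hts : t = max x.1 ystart
        · subst hts
          rw [PySem.Dict.getD_modify_self]
          have hc : contrib ystart yend x (max x.1 ystart) = x.2.2 := by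
            unfold contrib; rw [if_pos hse, if_pos rfl, if_neg hne]; ring
          rw [hc]; ring
        · rw [PySem.Dict.getD_modify_of_ne _ _ _ hts]
          have hc : contrib ystart yend x t = 0 := by
            unfold contrib
            rw [if_pos hse, if_neg (fun h => hts h.symm), if_neg (fun h => hte h.symm)]
            ring
          rw [hc]; ring
    · rw [if_neg hse]
      have hc : contrib ystart yend x t = 0 := by unfold contrib; rw [if_neg hse]
      rw [hc]; ring

lemma getD_buildDelta (celeb : List (Int × Int × Int)) (ystart yend t : Int) :
    (buildDelta celeb ystart yend).getD t 0 = contribSum celeb ystart yend t := by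
  have h := getD_buildDelta_aux celeb ystart yend t PySem.Dict.empty
  simpa [buildDelta] using h

lemma covSum_eq_sum (celeb : List (Int × Int × Int)) (t : Int) :
    covSum celeb t = (celeb.map (fun x => if x.1 ≤ t ∧ t < x.2.1 then x.2.2 else 0)).sum := by
  unfold covSum
  have : (fun (total_pref : Int) (x : Int × Int × Int) =>
      if x.1 ≤ t ∧ t < x.2.1 then total_pref + x.2.2 else total_pref) =
      (fun total_pref x => total_pref + (if x.1 ≤ t ∧ t < x.2.1 then x.2.2 else 0)) := by
    funext a x; split_ifs <;> omega
  rw [this, PySem.List.foldl_add]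
  omega

-- one-point telescoping identity, per interval
lemma contrib_point (ystart yend t : Int) (x : Int × Int × Int)
    (h1 : ystart ≤ t) (h2 : t < yend) :
    (if x.1 ≤ t ∧ t < x.2.1 then x.2.2 else 0) =
      (if t = ystart then 0 else if x.1 ≤ t - 1 ∧ t - 1 < x.2.1 then x.2.2 else 0) +
      contrib ystart yend x t := by
  unfold contrib
  split_ifs <;> omega

lemma covSum_step (celeb : List (Int × Int × Int)) (ystart yend t : Int)
    (h1 : ystart ≤ t) (h2 : t < yend) :
    covSum celeb t =
      (if t = ystart then 0 else covSum celeb (t - 1)) + contribSum celeb ystart yend t := by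
  have hpt : ∀ x ∈ celeb, (if x.1 ≤ t ∧ t < x.2.1 then x.2.2 else 0) =
      (if t = ystart then (0 : Int) else if x.1 ≤ t - 1 ∧ t - 1 < x.2.1 then x.2.2 else 0) +
        contrib ystart yend x t :=
    fun x _ => contrib_point ystart yend t x h1 h2
  rw [covSum_eq_sum, List.map_congr_left hpt]
  by_cases ht : t = ystart
  · simp [ht, contribSum]
  · simp only [if_neg ht, PySem.List.sum_map_add_int, contribSum, covSum_eq_sum]

lemma loop_eq (celeb : List (Int × Int × Int)) (ystart yend : Int) :
    ∀ (n : Nat) (a mp tm run : Int), ystart ≤ a → (yend - a).toNat = n →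
    run = (if a = ystart then 0 else covSum celeb (a - 1)) →
    ((((PySem.List.pyRange a yend 1).foldl (stepB (buildDelta celeb ystart yend)) (mp, tm, run)).1,
      (((PySem.List.pyRange a yend 1).foldl (stepB (buildDelta celeb ystart yend)) (mp, tm, run)).2.1)) =
      (PySem.List.pyRange a yend 1).foldl (stepA celeb) (mp, tm)) := by
  intro n
  induction n with
  | zero =>
    intro a mp tm run ha hn hrun
    have hya : yend ≤ a := by omega
    simp [PySem.List.pyRange_one_eq_nil hya]
  | succ m ih =>
    intro a mp tm run ha hn hrun
    have hay : a < yend := by omega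
    rw [PySem.List.pyRange_one_cons hay]
    simp only [List.foldl_cons]
    have hrunning : run + (buildDelta celeb ystart yend).getD a 0 = covSum celeb a := by
      rw [getD_buildDelta, hrun, ← covSum_step celeb ystart yend a ha hay]
    have hB : stepB (buildDelta celeb ystart yend) (mp, tm, run) a =
        (if covSum celeb a > mp then (covSum celeb a, a, covSum celeb a)
         else (mp, tm, covSum celeb a)) := by
      simp only [stepB, hrunning]
    have hA : stepA celeb (mp, tm) a =
        (if covSum celeb a > mp then (covSum celeb a, a) else (mp, tm)) := by
      simp only [stepA]
    rw [hB, hA]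
    have hinv : covSum celeb a = (if a + 1 = ystart then 0 else covSum celeb (a + 1 - 1)) := by
      have : ¬ (a + 1 = ystart) := by omega
      simp [this]
    by_cases hc : covSum celeb a > mp
    · simp only [if_pos hc]
      exact ih (a + 1) (covSum celeb a) a (covSum celeb a) (by omega) (by omega) hinv
    · simp only [if_neg hc]
      exact ih (a + 1) mp tm (covSum celeb a) (by omega) (by omega) hinv

-- ===== VERDICT (by name: the statement is the Claim_ definition above) =====
theorem max_preference_in_time_range_spec : Claim_equal_max_preference_in_time_range := by
  intro celeb ystart yend _
  unfold Spec_max_preference_in_time_range max_preference_in_time_range max_preference_in_time_range_alt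
  have h := loop_eq celeb ystart yend (yend - ystart).toNat ystart 0 ystart 0
    (le_refl _) rfl (by simp)
  rw [← h]
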